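-- pv_equiv track=rewrite | github.com/baebae02/baekjoon | 알록/5525.py | find_ioi_patterns
-- ===== SOURCE A (Python) =====
-- def find_ioi_patterns(S, N, M):
--     answer = 0
--     count = 0
--     i = 0
--
--     while i < (M - 1):
--         if S[i:i+3] == 'IOI':
--             i += 2
--             count += 1
--             if count == N:
--                 answer += 1
--                 count -= 1
--         else:
--             i += 1
--             count = 0
--
--     return answer
-- ===== SOURCE B (Python) =====
-- def find_ioi_patterns(S, N, M):
--     # Scan maximal runs of overlapping 'IOI' triples; a run of m triples
--     # contains max(0, m - N + 1) occurrences of P_N.  P_N needs N >= 1 repetitions.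
--     if N < 1:
--         return 0
--     answer = 0
--     i = 0
--     while i < M - 1:
--         if S[i:i+3] == 'IOI':
--             m = 1
--             while i + 2 < M - 1 and S[i+2:i+5] == 'IOI':
--                 m += 1
--                 i += 2
--             answer += max(0, m - N + 1)
--             i += 3
--         else:
--             i += 1
--     return answer
-- ===== Notes on version B (the rewrite author's own statement) =====
-- stated objective: alternative
-- what changed: Replaced A's increment/fire/reset counter state machine with a run-based scan: each maximal stretch of m overlapping 'IOI' triples is consumed once by an inner loop and contributes max(0, m - N + 1) occurrences arithmetically.
import Mathlib
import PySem

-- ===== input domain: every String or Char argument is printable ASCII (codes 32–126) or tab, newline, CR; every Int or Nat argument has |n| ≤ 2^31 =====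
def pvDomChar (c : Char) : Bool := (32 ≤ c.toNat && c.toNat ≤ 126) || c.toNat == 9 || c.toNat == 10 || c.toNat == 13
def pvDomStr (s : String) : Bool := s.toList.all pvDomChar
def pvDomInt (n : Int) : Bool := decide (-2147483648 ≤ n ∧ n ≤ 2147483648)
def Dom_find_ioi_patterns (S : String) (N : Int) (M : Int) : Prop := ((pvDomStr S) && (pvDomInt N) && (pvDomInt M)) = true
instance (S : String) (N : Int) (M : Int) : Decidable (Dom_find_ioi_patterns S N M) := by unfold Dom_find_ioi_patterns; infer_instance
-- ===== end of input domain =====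

-- B replaces A's increment/fire/reset counter with a run-based scan (each maximal
-- stretch of m overlapping 'IOI' triples contributes max 0 (m - N + 1)); same cost.

-- termination helpers for the while-loop measures (cited by name in decreasing_by)
theorem pvDec2 {M i : Int} (h : i < M - 1) : (M - 1 - (i + 2)).toNat < (M - 1 - i).toNat := by omega
theorem pvDec1 {M i : Int} (h : i < M - 1) : (M - 1 - (i + 1)).toNat < (M - 1 - i).toNat := by omega
theorem pvDecI {M i : Int} (h : i + 2 < M - 1) : (M - 1 - (i + 2)).toNat < (M - 1 - i).toNat := by omega
theorem pvDecJ {M i j : Int} (h : i < M - 1) (hij : i ≤ j) : (M - 1 - (j + 3)).toNat < (M - 1 - i).toNat := by omega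

-- ===== PORT A =====
-- A's while loop; state (answer, count, i), branches in A's order.
def findA_loop (S : String) (N : Int) (M : Int) (ans : Int) (c : Int) (i : Int) : Int :=
  if _h : i < M - 1 then
    if PySem.Str.slice S (some i) (some (i + 3)) == "IOI" then
      -- i += 2; count += 1; if count == N: answer += 1; count -= 1
      if c + 1 == N then findA_loop S N M (ans + 1) (c + 1 - 1) (i + 2)
      else findA_loop S N M ans (c + 1) (i + 2)
    else
      -- i += 1; count = 0
      findA_loop S N M ans 0 (i + 1)
  else ans
termination_by (M - 1 - i).toNat
decreasing_by
  · exact pvDec2 _h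
  · exact pvDec2 _h
  · exact pvDec1 _h

def find_ioi_patterns (S : String) (N : Int) (M : Int) : Int :=
  findA_loop S N M 0 0 0

-- ===== PORT B =====
-- B's inner while loop: counts further overlapping 'IOI' triples; returns (m, i).
def findB_inner (S : String) (M : Int) (m : Int) (i : Int) : Int × Int :=
  if _h : i + 2 < M - 1 ∧ PySem.Str.slice S (some (i + 2)) (some (i + 5)) == "IOI" then
    findB_inner S M (m + 1) (i + 2)
  else (m, i)
termination_by (M - 1 - i).toNat
decreasing_by exact pvDecI _h.1

-- termination helper for findB_loop (cited by name in its decreasing_by)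
theorem findB_inner_ge (S : String) (M : Int) : ∀ m i : Int, i ≤ (findB_inner S M m i).2 := by
  intro m i
  fun_induction findB_inner with
  | case1 m i h ih => omega
  | case2 m i h => simp

-- B's outer while loop.
def findB_loop (S : String) (N : Int) (M : Int) (ans : Int) (i : Int) : Int :=
  if _h : i < M - 1 then
    if PySem.Str.slice S (some i) (some (i + 3)) == "IOI" then
      let p := findB_inner S M 1 i
      findB_loop S N M (ans + max 0 (p.1 - N + 1)) (p.2 + 3)
    else findB_loop S N M ans (i + 1)
  else ans
termination_by (M - 1 - i).toNat
decreasing_by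
  · exact pvDecJ _h (findB_inner_ge S M 1 i)
  · exact pvDec1 _h

def find_ioi_patterns_alt (S : String) (N : Int) (M : Int) : Int :=
  if N < 1 then 0 else findB_loop S N M 0 0

-- ===== PRECONDITION & SPEC =====
def Spec_find_ioi_patterns (S : String) (N : Int) (M : Int) (out : Int) : Prop := out = find_ioi_patterns_alt S N M
instance (S : String) (N : Int) (M : Int) (out : Int) : Decidable (Spec_find_ioi_patterns S N M out) := by unfold Spec_find_ioi_patterns; infer_instance

-- ===== CLAIM (what is proved, stated in full; the proofs are below) =====
def Claim_equal_find_ioi_patterns : Prop := ∀ (S : String) (N : Int) (M : Int), Dom_find_ioi_patterns S N M → Spec_find_ioi_patterns S N M (find_ioi_patterns S N M)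

-- ===== LEMMAS AND PROOFS =====

-- With N < 1, A's counter (kept ≥ 0) can never equal N, so the answer never changes.
theorem findA_loop_of_N_lt_one (S : String) (N M : Int) (hN : N < 1) :
    ∀ ans c i : Int, 0 ≤ c → findA_loop S N M ans c i = ans := by
  intro ans c i
  fun_induction findA_loop with
  | case1 ans c i h hs hc ih =>
    intro h0
    have hc' : c + 1 = N := by simpa using hc
    exact absurd hc' (by omega)
  | case2 ans c i h hs hc ih => intro h0; exact ih (by omega)
  | case3 ans c i h hs ih => intro _; exact ih (by omega)
  | case4 ans c i h => intro _; rfl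

-- the inner loop's accumulator m only shifts the first component
theorem findB_inner_fst_add (S : String) (M : Int) :
    ∀ (m k i : Int), findB_inner S M (m + k) i =
      ((findB_inner S M m i).1 + k, (findB_inner S M m i).2) := by
  intro m k i
  induction hn : (M - 1 - i).toNat using Nat.strong_induction_on generalizing m i with
  | _ n ih =>
    by_cases h : (i + 2 < M - 1 ∧ (PySem.Str.slice S (some (i + 2)) (some (i + 5)) == "IOI") = true)
    · rw [findB_inner, dif_pos h]
      conv_rhs => rw [findB_inner, dif_pos h]
      rw [show m + k + 1 = (m + 1) + k by ring]
      exact ih (M - 1 - (i + 2)).toNat (by omega) (m + 1) (i + 2) rfl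
    · rw [findB_inner, dif_neg h]
      conv_rhs => rw [findB_inner, dif_neg h]

theorem findB_inner_fst_ge (S : String) (M : Int) : ∀ m i : Int, m ≤ (findB_inner S M m i).1 := by
  intro m i
  fun_induction findB_inner with
  | case1 m i h ih => omega
  | case2 m i h => simp

-- the run lemma: from a match position with counter c (0 ≤ c < N), A's loop consumes the
-- whole maximal run (found by B's inner loop) and fires max 0 (c + m - N + 1) times.
theorem findA_run (S : String) (N M : Int) (hN : 1 ≤ N) :
    ∀ (i ans c : Int), i < M - 1 →
      PySem.Str.slice S (some i) (some (i + 3)) == "IOI" → 0 ≤ c → c < N →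
      findA_loop S N M ans c i =
        findA_loop S N M (ans + max 0 (c + (findB_inner S M 1 i).1 - N + 1)) 0
          ((findB_inner S M 1 i).2 + 3) := by
  intro i ans c
  induction hn : (M - 1 - i).toNat using Nat.strong_induction_on generalizing i ans c with
  | _ n ih =>
    intro hi ht hc0 hcN
    rw [findA_loop]
    simp only [hi, dite_true, ht, if_true]
    by_cases hcont : (i + 2 < M - 1 ∧ (PySem.Str.slice S (some (i + 2)) (some (i + 2 + 3)) == "IOI") = true)
    · -- the run continues at i+2
      have hinner : findB_inner S M 1 i = ((findB_inner S M 1 (i + 2)).1 + 1, (findB_inner S M 1 (i + 2)).2) := by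
        rw [findB_inner, dif_pos (by rw [show i + 5 = i + 2 + 3 by ring]; exact hcont)]
        exact findB_inner_fst_add S M 1 1 (i + 2)
      have hq1 : (1 : Int) ≤ (findB_inner S M 1 (i + 2)).1 := findB_inner_fst_ge S M 1 (i + 2)
      split
      · next hfire =>
        have hc1 : c + 1 = N := by simpa using hfire
        rw [ih (M - 1 - (i + 2)).toNat (by omega) (i + 2) (ans + 1) (c + 1 - 1) rfl hcont.1 hcont.2 (by omega) (by omega)]
        rw [hinner]
        congr 1
        omega
      · next hfire =>
        have hne : c + 1 ≠ N := by simpa using hfire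
        rw [ih (M - 1 - (i + 2)).toNat (by omega) (i + 2) ans (c + 1) rfl hcont.1 hcont.2 (by omega) (by omega)]
        rw [hinner]
        congr 1
        omega
    · -- the run stops: inner loop returns (1, i)
      have hinner : findB_inner S M 1 i = (1, i) := by
        rw [findB_inner, dif_neg (by rw [show i + 5 = i + 2 + 3 by ring]; exact hcont)]
      rw [hinner]
      have hF : ∀ a' : Int, findA_loop S N M a' 0 (i + 3) =
          (if i + 2 < M - 1 then findA_loop S N M a' 0 (i + 3) else a') := by
        intro a'
        split
        · rfl
        · next h2 => rw [findA_loop]; simp only [show ¬ (i + 3 < M - 1) by omega, dite_false]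
      have hstep : ∀ (a' c' : Int), findA_loop S N M a' c' (i + 2) =
          (if i + 2 < M - 1 then findA_loop S N M a' 0 (i + 2 + 1) else a') := by
        intro a' c'
        rw [findA_loop]
        by_cases h2 : i + 2 < M - 1
        · have hnt : ¬ ((PySem.Str.slice S (some (i + 2)) (some (i + 2 + 3)) == "IOI") = true) := by
            intro hh; exact hcont ⟨h2, hh⟩
          simp only [h2, dite_true, if_neg hnt, if_true]
        · simp only [h2, dite_false, if_false]
      split
      · next hfire =>
        have hc1 : c + 1 = N := by simpa using hfire
        rw [hstep, hF]
        split
        · congr 1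
          · omega
          · omega
        · omega
      · next hfire =>
        have hne : c + 1 ≠ N := by simpa using hfire
        rw [hstep, hF]
        split
        · congr 1
          · omega
          · omega
        · omega

-- main: with counter 0, A's loop equals B's loop
theorem findA_eq_findB (S : String) (N M : Int) (hN : 1 ≤ N) :
    ∀ (i ans : Int), findA_loop S N M ans 0 i = findB_loop S N M ans i := by
  intro i ans
  induction hn : (M - 1 - i).toNat using Nat.strong_induction_on generalizing i ans with
  | _ n ih =>
    rw [findB_loop]
    split
    · next hi =>
      split
      · next ht =>
        rw [findA_run S N M hN i ans 0 hi ht le_rfl (by omega)]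
        have hgei : i ≤ (findB_inner S M 1 i).2 := findB_inner_ge S M 1 i
        have := ih (M - 1 - ((findB_inner S M 1 i).2 + 3)).toNat (by omega)
          ((findB_inner S M 1 i).2 + 3) (ans + max 0 ((findB_inner S M 1 i).1 - N + 1)) rfl
        rw [show (0 : Int) + (findB_inner S M 1 i).1 - N + 1 = (findB_inner S M 1 i).1 - N + 1 by ring]
        exact this
      · next ht =>
        rw [findA_loop]
        simp only [hi, dite_true, ht]
        exact ih (M - 1 - (i + 1)).toNat (by omega) (i + 1) ans rfl
    · next hi =>
      rw [findA_loop]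
      simp only [hi, dite_false]

-- ===== VERDICT (by name: the statement is the Claim_ definition above) =====
theorem find_ioi_patterns_spec : Claim_equal_find_ioi_patterns := by
  intro S N M _hdom
  unfold Spec_find_ioi_patterns find_ioi_patterns find_ioi_patterns_alt
  by_cases hN : N < 1
  · simp only [hN, if_true]
    exact findA_loop_of_N_lt_one S N M hN 0 0 0 le_rfl
  · simp only [hN, if_false]
    exact findA_eq_findB S N M (by omega) 0 0
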